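-- pv_equiv track=rewrite | github.com/microsoft/muzic | musecoco/2-attribute2music_model/midi_data_extractor/utils/chord.py | convert_pitch_index_to_token
-- ===== SOURCE A (Python) =====
-- def convert_pitch_index_to_token(pitch_index, offset=0, min_pitch=None, max_pitch=None, tag='p'):
--     p = pitch_index + offset
--     if min_pitch is not None:
--         while p < min_pitch:
--             p += 12
--     if max_pitch is not None:
--         while p > max_pitch:
--             p -= 12
--     assert p >= 0, (pitch_index, offset, min_pitch, max_pitch)
--     if min_pitch is not None:
--         assert p >= min_pitch, (pitch_index, offset, min_pitch, max_pitch)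
--     if max_pitch is not None:
--         assert p <= max_pitch, (pitch_index, offset, min_pitch, max_pitch)
--     return '%s-%d' % (tag, p)
-- ===== SOURCE B (Python) =====
-- def convert_pitch_index_to_token(pitch_index, offset=0, min_pitch=None, max_pitch=None, tag='p'):
--     p = pitch_index + offset
--     if min_pitch is not None and p < min_pitch:
--         p += ((min_pitch - p + 11) // 12) * 12
--     if max_pitch is not None and p > max_pitch:
--         p -= ((p - max_pitch + 11) // 12) * 12
--     assert p >= 0, (pitch_index, offset, min_pitch, max_pitch)
--     if min_pitch is not None:
--         assert p >= min_pitch, (pitch_index, offset, min_pitch, max_pitch)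
--     if max_pitch is not None:
--         assert p <= max_pitch, (pitch_index, offset, min_pitch, max_pitch)
--     return '%s-%d' % (tag, p)
-- ===== Notes on version B (the rewrite author's own statement) =====
-- stated objective: faster
-- what changed: Each while-loop stepping by 12 is replaced by a single closed-form ceiling-division adjustment, keeping the min-then-max order and the identical assert chain.
import Mathlib
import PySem

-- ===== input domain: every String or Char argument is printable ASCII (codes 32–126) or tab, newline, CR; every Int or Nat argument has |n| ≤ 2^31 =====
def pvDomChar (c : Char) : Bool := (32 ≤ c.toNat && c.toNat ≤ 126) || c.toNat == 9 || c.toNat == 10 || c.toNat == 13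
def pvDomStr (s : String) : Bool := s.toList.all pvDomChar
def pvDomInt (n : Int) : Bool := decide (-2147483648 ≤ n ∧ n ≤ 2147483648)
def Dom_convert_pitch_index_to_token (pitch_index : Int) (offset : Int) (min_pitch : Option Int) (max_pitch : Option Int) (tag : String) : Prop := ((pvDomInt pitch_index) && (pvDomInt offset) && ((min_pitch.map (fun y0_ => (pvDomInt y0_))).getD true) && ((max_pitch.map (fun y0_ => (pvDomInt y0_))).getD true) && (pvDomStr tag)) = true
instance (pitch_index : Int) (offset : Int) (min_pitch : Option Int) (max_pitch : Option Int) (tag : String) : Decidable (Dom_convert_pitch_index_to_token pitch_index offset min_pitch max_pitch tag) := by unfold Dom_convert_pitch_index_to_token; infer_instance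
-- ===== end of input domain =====

-- B replaces each while-loop (step 12) by one closed-form ceiling-division adjustment; same assert chain and token format.


-- ===== PORT A =====
-- while p < m: p += 12
def pvLoopMin (m : Int) (p : Int) : Int :=
  if p < m then pvLoopMin m (p + 12) else p
termination_by (m - p).toNat
decreasing_by omega

-- while p > M: p -= 12
def pvLoopMax (M : Int) (p : Int) : Int :=
  if M < p then pvLoopMax M (p - 12) else p
termination_by (p - M).toNat
decreasing_by omega

-- asserts raise in Python; the port returns "" there (such inputs are outside Pre_)
def convert_pitch_index_to_token (pitch_index : Int) (offset : Int) (min_pitch : Option Int) (max_pitch : Option Int) (tag : String) : String :=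
  let p0 := pitch_index + offset
  let p1 := match min_pitch with | some m => pvLoopMin m p0 | none => p0
  let p2 := match max_pitch with | some M => pvLoopMax M p1 | none => p1
  if p2 < 0 then ""
  else if min_pitch.any (fun m => decide (p2 < m)) then ""
  else if max_pitch.any (fun M => decide (M < p2)) then ""
  else tag ++ "-" ++ PySem.Int.toStr p2

-- ===== PORT B =====
def convert_pitch_index_to_token_alt (pitch_index : Int) (offset : Int) (min_pitch : Option Int) (max_pitch : Option Int) (tag : String) : String :=
  let p0 := pitch_index + offset
  let p1 := match min_pitch with
    | some m => if p0 < m then p0 + (PySem.Int.floordiv (m - p0 + 11) 12) * 12 else p0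
    | none => p0
  let p2 := match max_pitch with
    | some M => if M < p1 then p1 - (PySem.Int.floordiv (p1 - M + 11) 12) * 12 else p1
    | none => p1
  if p2 < 0 then ""
  else if min_pitch.any (fun m => decide (p2 < m)) then ""
  else if max_pitch.any (fun M => decide (M < p2)) then ""
  else tag ++ "-" ++ PySem.Int.toStr p2

-- ===== PRECONDITION & SPEC =====
-- Pre_ excludes exactly the inputs where A's assert chain raises AssertionError
-- (final clamped pitch negative, below min_pitch, or above max_pitch).
def Pre_convert_pitch_index_to_token (pitch_index : Int) (offset : Int) (min_pitch : Option Int) (max_pitch : Option Int) (tag : String) : Prop :=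
  let p0 := pitch_index + offset
  let p1 := match min_pitch with
    | some m => if p0 < m then p0 + ((m - p0 + 11) / 12) * 12 else p0
    | none => p0
  let p2 := match max_pitch with
    | some M => if M < p1 then p1 - ((p1 - M + 11) / 12) * 12 else p1
    | none => p1
  0 ≤ p2 ∧ (min_pitch.all fun m => decide (m ≤ p2)) = true ∧ (max_pitch.all fun M => decide (p2 ≤ M)) = true
instance (pitch_index : Int) (offset : Int) (min_pitch : Option Int) (max_pitch : Option Int) (tag : String) : Decidable (Pre_convert_pitch_index_to_token pitch_index offset min_pitch max_pitch tag) := by unfold Pre_convert_pitch_index_to_token; infer_instance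

def pvWitness_convert_pitch_index_to_token : Int × Int × Option Int × Option Int × String := (60, 3, some 48, some 72, "p")

def Spec_convert_pitch_index_to_token (pitch_index : Int) (offset : Int) (min_pitch : Option Int) (max_pitch : Option Int) (tag : String) (out : String) : Prop := out = convert_pitch_index_to_token_alt pitch_index offset min_pitch max_pitch tag
instance (pitch_index : Int) (offset : Int) (min_pitch : Option Int) (max_pitch : Option Int) (tag : String) (out : String) : Decidable (Spec_convert_pitch_index_to_token pitch_index offset min_pitch max_pitch tag out) := by unfold Spec_convert_pitch_index_to_token; infer_instance

-- ===== CLAIM (what is proved, stated in full; the proofs are below) =====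
def Claim_equal_convert_pitch_index_to_token : Prop := ∀ (pitch_index : Int) (offset : Int) (min_pitch : Option Int) (max_pitch : Option Int) (tag : String), Dom_convert_pitch_index_to_token pitch_index offset min_pitch max_pitch tag → Pre_convert_pitch_index_to_token pitch_index offset min_pitch max_pitch tag → Spec_convert_pitch_index_to_token pitch_index offset min_pitch max_pitch tag (convert_pitch_index_to_token pitch_index offset min_pitch max_pitch tag)

-- ===== LEMMAS AND PROOFS =====
theorem pvLoopMin_eq (m p : Int) : pvLoopMin m p = if p < m then p + ((m - p + 11) / 12) * 12 else p := by
  fun_induction pvLoopMin m p with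
  | case1 p h ih => rw [ih]; split_ifs <;> omega
  | case2 p h => simp [h]

theorem pvLoopMax_eq (M p : Int) : pvLoopMax M p = if M < p then p - ((p - M + 11) / 12) * 12 else p := by
  fun_induction pvLoopMax M p with
  | case1 p h ih => rw [ih]; split_ifs <;> omega
  | case2 p h => simp [h]

-- ===== VERDICT (by name: the statement is the Claim_ definition above) =====
theorem convert_pitch_index_to_token_spec : Claim_equal_convert_pitch_index_to_token := by
  intro pitch_index offset min_pitch max_pitch tag _ _
  unfold Spec_convert_pitch_index_to_token
  unfold convert_pitch_index_to_token convert_pitch_index_to_token_alt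
  cases min_pitch <;> cases max_pitch <;>
    simp only [pvLoopMin_eq, pvLoopMax_eq,
      PySem.Int.floordiv_eq_ediv_of_pos (b := 12) (by norm_num)]
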